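-- pv_equiv track=rewrite | github.com/juicywhisperer/CSE5P-Intro2Python | hw4.py | step_count
-- ===== SOURCE A (Python) =====
-- def step_count(ins_str):        # DO NOT CHANGE THIS LINE
--   result = 0                    # DO NOT CHANGE THIS LINE
--     #
--     # Your code here
--   for idx in range(0,len(ins_str)):
--     if ins_str[idx] in {'u','U','d','D','l','L','r','R'}:
--       result += 1
--     else:
--       return -1
--     #
--   return result                 # DO NOT CHANGE THIS LINE
-- ===== SOURCE B (Python) =====
-- def step_count(ins_str):
--     valid = {'u', 'U', 'd', 'D', 'l', 'L', 'r', 'R'}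
--     return len(ins_str) if set(ins_str) <= valid else -1
-- ===== Notes on version B (the rewrite author's own statement) =====
-- stated objective: simpler
-- what changed: Replaces the per-character loop with branch and early return by a single subset test of the string's distinct characters against the valid set, returning len(ins_str) or -1.
import Mathlib
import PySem

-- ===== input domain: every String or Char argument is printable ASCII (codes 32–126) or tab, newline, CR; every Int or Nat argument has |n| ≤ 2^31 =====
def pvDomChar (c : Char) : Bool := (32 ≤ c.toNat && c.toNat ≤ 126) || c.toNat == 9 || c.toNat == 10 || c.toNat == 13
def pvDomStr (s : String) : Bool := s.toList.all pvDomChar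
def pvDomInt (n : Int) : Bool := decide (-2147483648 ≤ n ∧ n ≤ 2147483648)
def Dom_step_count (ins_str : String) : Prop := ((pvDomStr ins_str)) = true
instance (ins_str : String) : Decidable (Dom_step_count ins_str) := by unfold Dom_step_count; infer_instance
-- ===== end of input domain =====

-- B replaces A's per-character loop with early return by a single subset test of
-- the string's distinct characters against the valid set (objective: simpler).

-- ===== PORT A =====
-- A's loop over indices with `result += 1` / early `return -1`, as structural
-- recursion over the remaining characters carrying `result`.
def stepCountLoop (cs : List Char) (result : Int) : Int :=
  match cs with
  | [] => result
  | c :: rest =>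
      if PySem.Set.contains (PySem.Set.ofList ['u','U','d','D','l','L','r','R']) c then
        stepCountLoop rest (result + 1)
      else
        -1

def step_count (ins_str : String) : Int :=
  stepCountLoop ins_str.toList 0

-- ===== PORT B =====
def step_count_alt (ins_str : String) : Int :=
  if PySem.Set.issubset (PySem.Set.ofList ins_str.toList)
       (PySem.Set.ofList ['u','U','d','D','l','L','r','R']) then
    (PySem.Str.len ins_str : Int)
  else
    -1

-- ===== PRECONDITION & SPEC =====
def Spec_step_count (ins_str : String) (out : Int) : Prop := out = step_count_alt ins_str
instance (ins_str : String) (out : Int) : Decidable (Spec_step_count ins_str out) := by unfold Spec_step_count; infer_instance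

-- ===== CLAIM (what is proved, stated in full; the proofs are below) =====
def Claim_equal_step_count : Prop := ∀ (ins_str : String), Dom_step_count ins_str → Spec_step_count ins_str (step_count ins_str)

-- ===== LEMMAS AND PROOFS =====

-- A's loop equals: if every char is valid then result + length else -1.
theorem stepCountLoop_eq (cs : List Char) (result : Int) :
    stepCountLoop cs result =
      if cs.all (fun c => PySem.Set.contains (PySem.Set.ofList ['u','U','d','D','l','L','r','R']) c) then
        result + cs.length
      else -1 := by
  induction cs generalizing result with
  | nil => simp [stepCountLoop]
  | cons c rest ih =>
      rw [stepCountLoop, List.all_cons]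
      by_cases h : PySem.Set.contains (PySem.Set.ofList ['u','U','d','D','l','L','r','R']) c = true
      · rw [if_pos h, ih, h, Bool.true_and]
        by_cases h2 : rest.all (fun c => PySem.Set.contains (PySem.Set.ofList ['u','U','d','D','l','L','r','R']) c) = true
        · rw [if_pos h2, if_pos h2]
          simp only [List.length_cons]
          push_cast; ring
        · rw [if_neg h2, if_neg h2]
      · rw [if_neg h, if_neg (fun hh => h ((Bool.and_eq_true _ _).mp hh).1)]

-- ===== VERDICT (by name: the statement is the Claim_ definition above) =====
theorem step_count_spec : Claim_equal_step_count := by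
  intro s _
  unfold Spec_step_count step_count step_count_alt
  rw [stepCountLoop_eq]
  have hsub : PySem.Set.issubset (PySem.Set.ofList s.toList)
      (PySem.Set.ofList ['u','U','d','D','l','L','r','R']) =
      s.toList.all (fun c => PySem.Set.contains (PySem.Set.ofList ['u','U','d','D','l','L','r','R']) c) := by
    rw [Bool.eq_iff_iff, PySem.Set.issubset_iff, List.all_eq_true]
    constructor
    · intro hs x hx
      exact (PySem.Set.contains_iff _ _).mpr (hs x ((PySem.Set.mem_ofList _ _).mpr hx))
    · intro hall x hx
      exact (PySem.Set.contains_iff _ _).mp (hall x ((PySem.Set.mem_ofList _ _).mp hx))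
  rw [hsub]
  split_ifs
  · simp [PySem.Str.len]
  · rfl
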